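-- pv_equiv track=rewrite | github.com/chiragpatel1229/Cryptographic-RBGs-Development-and-Analysis | RBG_Test_suit/GDF box plots.py | get_all_gaps
-- ===== SOURCE A (Python) =====
-- def get_selected_gap(seq_list, gap_index_value):
--     sel_gaps = []
--     for n in seq_list:
--         if gap_index_value < len(n):  # Check if gap_index_value is a valid index for n
--             sel_gaps.append(n[gap_index_value])
--         else:
--             sel_gaps.append(0)  # Append a default value if gap_index_value is not a valid index
--     return sel_gaps
--
-- def get_all_gaps(seq_list):
--
--     lengths = []                            # Initialize an empty list to store the lengths
--     for n in seq_list: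
--         sequence_length = len(n)            # Get the length of the current sequence
--         lengths.append(sequence_length)     # Append the length to the lengths list
--
--     max_length = max(lengths)               # Get the maximum length from the lengths list
--
--     max_gap_index = max_length - 1          # Subtract 1 from the maximum length to get the maximum gap index
--
--     all_gaps = []
--     for gap_index in range(max_gap_index + 1):  # Loop through each gap index
--         gap_values = get_selected_gap(seq_list, gap_index)
--         all_gaps.append(gap_values)
--     return all_gaps
-- ===== SOURCE B (Python) =====
-- def get_all_gaps(seq_list):
--     max_length = max(len(n) for n in seq_list)
--     cols = []
--     rests = list(seq_list)
--     for _ in range(max_length):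
--         cols.append([r[0] if r else 0 for r in rests])
--         rests = [r[1:] for r in rests]
--     return cols
-- ===== Notes on version B (the rewrite author's own statement) =====
-- stated objective: alternative
-- what changed: Replaces A's per-column index scans (one pass over all sequences for each gap index, with a bounds check and n[i] indexing) by head/tail peeling: one parallel sweep that repeatedly takes each sequence's current head (0 when exhausted) and then drops it, never indexing; the per-step slice copies make B slower in Python, it is a different decomposition, not an optimisation.
import Mathlib
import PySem

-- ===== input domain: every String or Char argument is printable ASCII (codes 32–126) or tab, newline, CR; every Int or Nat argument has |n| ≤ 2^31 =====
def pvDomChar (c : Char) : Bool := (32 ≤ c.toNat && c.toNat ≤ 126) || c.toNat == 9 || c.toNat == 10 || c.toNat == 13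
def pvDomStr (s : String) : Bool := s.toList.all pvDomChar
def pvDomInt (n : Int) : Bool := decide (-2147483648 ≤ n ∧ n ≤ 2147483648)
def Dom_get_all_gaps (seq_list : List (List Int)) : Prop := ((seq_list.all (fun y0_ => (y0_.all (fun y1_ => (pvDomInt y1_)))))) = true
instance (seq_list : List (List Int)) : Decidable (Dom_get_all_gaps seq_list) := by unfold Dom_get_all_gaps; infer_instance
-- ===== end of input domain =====

-- B replaces A's per-column index scans by head/tail peeling over all sequences in parallel (alternative decomposition, same cost); both raise on an empty seq_list (excluded by Pre_).


-- ===== PORT A =====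
def get_selected_gap (seq_list : List (List Int)) (gap_index_value : Int) : List Int :=
  seq_list.foldl (fun sel_gaps n =>
    if gap_index_value < (n.length : Int) then
      sel_gaps ++ [(PySem.List.pyGet? n gap_index_value).getD 0]
    else
      sel_gaps ++ [0]) []

def get_all_gaps (seq_list : List (List Int)) : List (List Int) :=
  let lengths := seq_list.foldl (fun lengths n => lengths ++ [(n.length : Int)]) []
  match PySem.List.max? lengths (fun x => x) with
  | none => []   -- unreachable under Pre_ (max([]) raises ValueError)
  | some max_length =>
    let max_gap_index := max_length - 1
    (PySem.List.pyRange 0 (max_gap_index + 1) 1).foldl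
      (fun all_gaps gap_index => all_gaps ++ [get_selected_gap seq_list gap_index]) []

-- ===== PORT B =====
def get_all_gaps_alt (seq_list : List (List Int)) : List (List Int) :=
  match PySem.List.max? (seq_list.map (fun n => (n.length : Int))) (fun x => x) with
  | none => []   -- unreachable under Pre_ (max of an empty generator raises ValueError)
  | some max_length =>
    ((PySem.List.pyRange 0 max_length 1).foldl
      (fun (p : List (List Int) × List (List Int)) _ =>
        (p.1 ++ [p.2.map (fun r => r.headD 0)], p.2.map (fun r => r.drop 1)))
      ([], seq_list)).1

-- ===== PRECONDITION & SPEC =====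
-- Pre_ excludes only the empty list, on which both A and B raise ValueError (max of an empty sequence).
def Pre_get_all_gaps (seq_list : List (List Int)) : Prop := seq_list ≠ []
instance (seq_list : List (List Int)) : Decidable (Pre_get_all_gaps seq_list) := by unfold Pre_get_all_gaps; infer_instance
def pvWitness_get_all_gaps : List (List Int) := [[1, 2], [3]]

def Spec_get_all_gaps (seq_list : List (List Int)) (out : List (List Int)) : Prop := out = get_all_gaps_alt seq_list
instance (seq_list : List (List Int)) (out : List (List Int)) : Decidable (Spec_get_all_gaps seq_list out) := by unfold Spec_get_all_gaps; infer_instance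

-- ===== CLAIM (what is proved, stated in full; the proofs are below) =====
def Claim_equal_get_all_gaps : Prop := ∀ (seq_list : List (List Int)), Dom_get_all_gaps seq_list → Pre_get_all_gaps seq_list → Spec_get_all_gaps seq_list (get_all_gaps seq_list)

-- ===== LEMMAS AND PROOFS =====

-- get_selected_gap at a Nat index is the padded column read.
theorem gsg_eq_map (seq_list : List (List Int)) (i : Nat) :
    get_selected_gap seq_list (i : Int) = seq_list.map (fun n => (n[i]?).getD 0) := by
  unfold get_selected_gap
  suffices h : ∀ (l : List (List Int)) (acc : List Int),
      l.foldl (fun sel_gaps n => if (i : Int) < (n.length : Int) then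
          sel_gaps ++ [(PySem.List.pyGet? n (i : Int)).getD 0] else sel_gaps ++ [0]) acc
        = acc ++ l.map (fun n => (n[i]?).getD 0) by
    simpa using h seq_list []
  intro l
  induction l with
  | nil => intro acc; simp
  | cons n t ih =>
    intro acc
    rw [List.foldl_cons, ih]
    by_cases h : (i : Int) < (n.length : Int)
    · rw [if_pos h]
      simp [PySem.List.pyGet?_natCast]
    · have hlen : n.length ≤ i := by exact_mod_cast not_lt.mp h
      rw [if_neg h]
      simp [List.getElem?_eq_none hlen]

-- A's value with the shared maximum m.
theorem portA_eq (seq_list : List (List Int)) (m : Int)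
    (hm : PySem.List.max? (seq_list.map (fun n => (n.length : Int))) (fun x => x) = some m) :
    get_all_gaps seq_list = (List.range m.toNat).map (fun i => seq_list.map (fun n => (n[i]?).getD 0)) := by
  unfold get_all_gaps
  simp only [PySem.List.foldl_append_singleton_eq_map, List.nil_append, hm]
  have hmm : m - 1 + 1 = m := by ring
  rw [hmm, PySem.List.pyRange_one, List.map_map]
  simp only [sub_zero]
  refine List.map_congr_left (fun k _ => ?_)
  simp [gsg_eq_map]

-- B's loop invariant: after i peeling steps the columns 0..i-1 are emitted and every sequence has lost i heads.
theorem loopB_inv (seq_list : List (List Int)) (m : Nat) :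
    (List.range m).foldl
      (fun (p : List (List Int) × List (List Int)) (_ : Nat) =>
        (p.1 ++ [p.2.map (fun r => r.headD 0)], p.2.map (fun r => r.drop 1)))
      ([], seq_list)
    = ((List.range m).map (fun i => seq_list.map (fun n => (n[i]?).getD 0)),
       seq_list.map (fun n => n.drop m)) := by
  induction m with
  | zero => simp
  | succ m ih =>
    rw [List.range_succ, List.foldl_append, ih]
    simp only [List.foldl_cons, List.foldl_nil, List.map_map, List.map_append, List.map_cons,
      List.map_nil]
    have h1 : seq_list.map ((fun r => r.headD 0) ∘ fun n => List.drop m n)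
        = seq_list.map (fun n => (n[m]?).getD 0) :=
      List.map_congr_left (fun n _ => by simp [List.headD_eq_head?_getD, List.head?_drop])
    have h2 : seq_list.map ((fun r => List.drop 1 r) ∘ fun n => List.drop m n)
        = seq_list.map (fun n => List.drop (m + 1) n) :=
      List.map_congr_left (fun n _ => by simp)
    rw [h1, h2]

theorem portB_eq (seq_list : List (List Int)) (m : Int)
    (hm : PySem.List.max? (seq_list.map (fun n => (n.length : Int))) (fun x => x) = some m) :
    get_all_gaps_alt seq_list = (List.range m.toNat).map (fun i => seq_list.map (fun n => (n[i]?).getD 0)) := by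
  unfold get_all_gaps_alt
  rw [hm]
  dsimp only
  rw [PySem.List.pyRange_one, List.foldl_map, sub_zero, loopB_inv seq_list m.toNat]

-- ===== VERDICT (by name: the statement is the Claim_ definition above) =====
theorem get_all_gaps_spec : Claim_equal_get_all_gaps := by
  intro seq_list _hdom hpre
  unfold Spec_get_all_gaps
  cases hm : PySem.List.max? (seq_list.map (fun n => (n.length : Int))) (fun x => x) with
  | none =>
    exact absurd (List.map_eq_nil_iff.mp
      ((PySem.List.max?_eq_none_iff _ _).mp hm)) hpre
  | some m =>
    rw [portA_eq seq_list m hm, portB_eq seq_list m hm]
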